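-- pv_equiv track=rewrite | github.com/PragalvaXFREZ/meshery-schemas | build/scripts/audit/classify.py | _reduce_completeness
-- ===== SOURCE A (Python) =====
-- from typing import Any, Dict, List, Optional, Set, Tuple
--
-- def _dedup_notes(notes: List[str]) -> List[str]:
--     """Return notes with duplicates removed, preserving insertion order."""
--     seen: Set[str] = set()
--     result = []
--     for n in notes:
--         if n not in seen:
--             seen.add(n)
--             result.append(n)
--     return result
--
-- def _reduce_completeness(
--     method_comps: List[str], notes: List[str]
-- ) -> Tuple[str, List[str]]:
--     """Reduce a list of per-method completeness values to a single status."""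
--     unique = _dedup_notes(notes)
--     if all(c == "Full" for c in method_comps):
--         return "Full", unique
--     if any(c == "Full" for c in method_comps) or any(
--         c == "Partial" for c in method_comps
--     ):
--         return "Partial", unique
--     return "Stub", unique
-- ===== SOURCE B (Python) =====
-- def _reduce_completeness(method_comps, notes):
--     """Reduce per-method completeness values to a single status.
--
--     Different strategy: map each value to a numeric rank (Full=2, Partial=1,
--     other=0), track the min and max rank in one pass, and classify from those
--     two numbers; notes are deduped with the idiomatic dict.fromkeys one-liner.
--     """
--     unique = list(dict.fromkeys(notes))
--     lo, hi = 2, 0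
--     for c in method_comps:
--         r = 2 if c == "Full" else 1 if c == "Partial" else 0
--         if r < lo:
--             lo = r
--         if hi < r:
--             hi = r
--     if lo == 2:
--         return "Full", unique
--     if hi >= 1:
--         return "Partial", unique
--     return "Stub", unique
-- ===== Notes on version B (the rewrite author's own statement) =====
-- stated objective: alternative
-- what changed: B replaces A's three any/all boolean scans by a single numeric reduction (map each completeness value to a rank Full=2/Partial=1/other=0, keep the running min and max in one pass, classify from the two numbers) and dedups notes with the stdlib dict.fromkeys one-liner instead of A's seen-set accumulator loop.
import Mathlib
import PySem

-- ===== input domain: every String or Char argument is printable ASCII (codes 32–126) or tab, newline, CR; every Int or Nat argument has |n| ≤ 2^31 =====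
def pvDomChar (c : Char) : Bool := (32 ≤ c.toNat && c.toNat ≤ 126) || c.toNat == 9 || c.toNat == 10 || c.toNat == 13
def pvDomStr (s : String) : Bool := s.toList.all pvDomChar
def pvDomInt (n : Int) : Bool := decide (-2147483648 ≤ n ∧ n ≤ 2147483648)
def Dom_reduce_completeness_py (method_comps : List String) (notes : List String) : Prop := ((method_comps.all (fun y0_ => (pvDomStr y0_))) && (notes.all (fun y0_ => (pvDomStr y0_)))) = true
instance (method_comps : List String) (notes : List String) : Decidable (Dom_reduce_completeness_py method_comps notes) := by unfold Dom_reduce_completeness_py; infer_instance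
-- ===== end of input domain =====

-- B classifies by a single min/max-rank reduction (Full=2, Partial=1, other=0) instead of A's three any/all scans, and dedups notes with dict.fromkeys instead of a seen-set loop (alternative; same result).

-- ===== PORT A =====
-- _dedup_notes: seen-set + result-list loop, transliterated as a foldl over the pair state.
def dedup_notes_py (notes : List String) : List String :=
  (notes.foldl
    (fun (acc : PySem.Set String × List String) n =>
      if PySem.Set.contains acc.1 n then acc
      else (PySem.Set.add acc.1 n, acc.2 ++ [n]))
    (PySem.Set.empty, [])).2

def reduce_completeness_py (method_comps : List String) (notes : List String) : String × List String :=
  let unique := dedup_notes_py notes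
  if method_comps.all (fun c => c == "Full") then ("Full", unique)
  else if method_comps.any (fun c => c == "Full") || method_comps.any (fun c => c == "Partial") then
    ("Partial", unique)
  else ("Stub", unique)

-- ===== PORT B =====
-- r = 2 if c == "Full" else 1 if c == "Partial" else 0
def rank_alt (c : String) : Int :=
  if c == "Full" then 2 else if c == "Partial" then 1 else 0

def reduce_completeness_py_alt (method_comps : List String) (notes : List String) : String × List String :=
  -- list(dict.fromkeys(notes))
  let unique := PySem.List.dedup notes
  -- lo, hi = 2, 0; one pass updating the running min and max rank
  let lohi := method_comps.foldl
      (fun (a : Int × Int) c =>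
        let r := rank_alt c
        ((if r < a.1 then r else a.1), (if a.2 < r then r else a.2)))
      (2, 0)
  if lohi.1 == 2 then ("Full", unique)
  else if 1 ≤ lohi.2 then ("Partial", unique)
  else ("Stub", unique)

-- ===== PRECONDITION & SPEC =====
def Spec_reduce_completeness_py (method_comps : List String) (notes : List String) (out : String × List String) : Prop := out = reduce_completeness_py_alt method_comps notes
instance (method_comps : List String) (notes : List String) (out : String × List String) : Decidable (Spec_reduce_completeness_py method_comps notes out) := by unfold Spec_reduce_completeness_py; infer_instance

-- ===== CLAIM (what is proved, stated in full; the proofs are below) =====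
def Claim_equal_reduce_completeness_py : Prop := ∀ (method_comps : List String) (notes : List String), Dom_reduce_completeness_py method_comps notes → Spec_reduce_completeness_py method_comps notes (reduce_completeness_py method_comps notes)

-- ===== LEMMAS AND PROOFS =====

-- A's dedup loop keeps its seen-set equal (as a list) to its result list, so the result is Set.ofList.
theorem dedup_loop_eq (notes : List String) (s : List String) :
    (notes.foldl
      (fun (acc : PySem.Set String × List String) n =>
        if PySem.Set.contains acc.1 n then acc
        else (PySem.Set.add acc.1 n, acc.2 ++ [n]))
      (s, s)).2 = notes.foldl PySem.Set.add s := by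
  induction notes generalizing s with
  | nil => rfl
  | cons n t ih =>
    simp only [List.foldl_cons]
    by_cases h : n ∈ s
    · have h1 : PySem.Set.add s n = s := by simp [PySem.Set.add, h]
      simpa [h, h1] using ih s
    · have h1 : PySem.Set.add s n = s ++ [n] := by simp [PySem.Set.add, h]
      simpa [h, h1] using ih (s ++ [n])

theorem dedup_notes_a_eq (notes : List String) :
    dedup_notes_py notes = PySem.Set.ofList notes := by
  rw [PySem.Set.ofList_eq_foldl]
  exact dedup_loop_eq notes []

-- The fold computes the running min and max of the ranks, componentwise.
theorem lohi_fold_eq (mc : List String) (a : Int × Int) :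
    mc.foldl
      (fun (a : Int × Int) c =>
        let r := rank_alt c
        ((if r < a.1 then r else a.1), (if a.2 < r then r else a.2)))
      a
    = (mc.foldl (fun x c => min x (rank_alt c)) a.1,
       mc.foldl (fun x c => max x (rank_alt c)) a.2) := by
  have hfun : (fun (a : Int × Int) c =>
        let r := rank_alt c
        ((if r < a.1 then r else a.1), (if a.2 < r then r else a.2)))
      = (fun (a : Int × Int) c => (min a.1 (rank_alt c), max a.2 (rank_alt c))) := by
    funext a c
    refine Prod.ext ?_ ?_ <;> simp [min_def, max_def] <;> (split_ifs <;> omega)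
  rw [hfun, show a = (a.1, a.2) from rfl]
  exact PySem.List.foldl_prod_mk (fun x c => min x (rank_alt c)) (fun x c => max x (rank_alt c)) mc a.1 a.2

theorem min_fold_eq_two_iff (mc : List String) :
    (mc.foldl (fun x c => min x (rank_alt c)) 2 = 2) ↔ ∀ c ∈ mc, c = "Full" := by
  have gen : ∀ (l : List String) (x : Int), x ≤ 2 →
      (l.foldl (fun x c => min x (rank_alt c)) x = 2 ↔ x = 2 ∧ ∀ c ∈ l, c = "Full") := by
    intro l
    induction l with
    | nil => intro x _; simp
    | cons c t ih =>
      intro x hx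
      simp only [List.foldl_cons]
      have hr : rank_alt c ≤ 2 := by unfold rank_alt; split_ifs <;> omega
      rw [ih (min x (rank_alt c)) (le_trans (min_le_left _ _) hx)]
      constructor
      · rintro ⟨hmin, hall⟩
        have hx2 : x = 2 := by omega
        have hr2 : rank_alt c = 2 := by omega
        have hc : c = "Full" := by
          by_contra hne
          unfold rank_alt at hr2
          rw [if_neg (by simpa using hne)] at hr2
          split_ifs at hr2 <;> omega
        refine ⟨hx2, ?_⟩
        intro d hd
        rcases List.mem_cons.mp hd with rfl | hd'
        · exact hc
        · exact hall _ hd' 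
      · rintro ⟨hx2, hall⟩
        have hc : c = "Full" := hall c (by simp)
        have : rank_alt c = 2 := by simp [rank_alt, hc]
        exact ⟨by omega, fun d hd => hall d (by simp [hd])⟩
  simpa using gen mc 2 (le_refl 2)

theorem max_fold_ge_one_iff (mc : List String) :
    (1 ≤ mc.foldl (fun x c => max x (rank_alt c)) 0) ↔ ("Full" ∈ mc ∨ "Partial" ∈ mc) := by
  have gen : ∀ (l : List String) (x : Int),
      (1 ≤ l.foldl (fun x c => max x (rank_alt c)) x ↔ 1 ≤ x ∨ ∃ c ∈ l, 1 ≤ rank_alt c) := by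
    intro l
    induction l with
    | nil => intro x; simp
    | cons c t ih =>
      intro x
      simp only [List.foldl_cons]
      rw [ih (max x (rank_alt c))]
      constructor
      · rintro (h | ⟨d, hd, hr⟩)
        · rcases le_max_iff.mp h with h | h
          · exact Or.inl h
          · exact Or.inr ⟨c, by simp, h⟩
        · exact Or.inr ⟨d, by simp [hd], hr⟩
      · rintro (h | ⟨d, hd, hr⟩)
        · exact Or.inl (le_max_iff.mpr (Or.inl h))
        · rcases List.mem_cons.mp hd with rfl | hd'
          · exact Or.inl (le_max_iff.mpr (Or.inr hr))
          · exact Or.inr ⟨d, hd', hr⟩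
  rw [gen mc 0]
  constructor
  · rintro (h | ⟨c, hc, hr⟩)
    · omega
    · unfold rank_alt at hr
      split_ifs at hr with h1 h2
      · exact Or.inl (by simpa using (beq_iff_eq.mp h1 ▸ hc))
      · exact Or.inr (by simpa using (beq_iff_eq.mp h2 ▸ hc))
      · omega
  · rintro (h | h)
    · exact Or.inr ⟨"Full", h, by simp [rank_alt]⟩
    · exact Or.inr ⟨"Partial", h, by simp [rank_alt]⟩

-- ===== VERDICT (by name: the statement is the Claim_ definition above) =====
theorem reduce_completeness_py_spec : Claim_equal_reduce_completeness_py := by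
  intro mc notes _
  unfold Spec_reduce_completeness_py reduce_completeness_py reduce_completeness_py_alt
  simp only [dedup_notes_a_eq, PySem.List.dedup_eq_ofList, lohi_fold_eq]
  by_cases h1 : ∀ c ∈ mc, c = "Full"
  · have hA : (mc.all fun c => c == "Full") = true := by simpa using h1
    have hB : List.foldl (fun x c => min x (rank_alt c)) 2 mc = 2 :=
      (min_fold_eq_two_iff mc).mpr h1
    simp [hA, hB]
  · have hA : (mc.all fun c => c == "Full") = false := by simpa using h1
    have hB : ¬ List.foldl (fun x c => min x (rank_alt c)) 2 mc = 2 :=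
      fun hb => h1 ((min_fold_eq_two_iff mc).mp hb)
    by_cases h2 : "Full" ∈ mc ∨ "Partial" ∈ mc
    · have hA2 : ((mc.any fun c => c == "Full") || mc.any fun c => c == "Partial") = true := by
        simpa using h2
      have hB2 : 1 ≤ List.foldl (fun x c => max x (rank_alt c)) 0 mc :=
        (max_fold_ge_one_iff mc).mpr h2
      simp [hA, hB, hA2, hB2]
    · have hA2 : ((mc.any fun c => c == "Full") || mc.any fun c => c == "Partial") = false := by
        rw [not_or] at h2
        simp only [beq_iff_eq, Bool.or_eq_false_iff, List.any_eq_false]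
        exact ⟨fun x hx hc => h2.1 (hc ▸ hx), fun x hx hc => h2.2 (hc ▸ hx)⟩
      have hB2 : ¬ 1 ≤ List.foldl (fun x c => max x (rank_alt c)) 0 mc :=
        fun hb => h2 ((max_fold_ge_one_iff mc).mp hb)
      simp [hA, hB, hA2, hB2]
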